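-- pv_equiv track=rewrite | github.com/bybybybyby37/xlstm-translation | scripts/interactive_translate.py | clean_piece_ids
-- ===== SOURCE A (Python) =====
-- def clean_piece_ids(ids, bos_id, eos_id, pad_id):
--     """Remove PAD, truncate at EOS, and drop BOS before decoding."""
--     out = []
--     for x in ids:
--         if x == pad_id:
--             continue
--         if x == eos_id:
--             break
--         if x == bos_id:
--             continue
--         out.append(int(x))
--     return out
-- ===== SOURCE B (Python) =====
-- def clean_piece_ids(ids, bos_id, eos_id, pad_id):
--     """Remove PAD, truncate at EOS, and drop BOS before decoding.
--     Two phases: find the cut point (first EOS that is not a PAD, since PAD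
--     takes priority), then filter PAD/BOS from the prefix."""
--     cut = 0
--     n = len(ids)
--     while cut < n and (ids[cut] == pad_id or ids[cut] != eos_id):
--         cut += 1
--     return [int(x) for x in ids[:cut] if x != pad_id and x != bos_id]
-- ===== Notes on version B (the rewrite author's own statement) =====
-- stated objective: alternative
-- what changed: A's single fused loop with continue/break is split into two phases: first locate the truncation point (first EOS token that is not also PAD, preserving A's pad-before-eos precedence), then filter PAD/BOS out of that prefix with a comprehension.
import Mathlib
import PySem

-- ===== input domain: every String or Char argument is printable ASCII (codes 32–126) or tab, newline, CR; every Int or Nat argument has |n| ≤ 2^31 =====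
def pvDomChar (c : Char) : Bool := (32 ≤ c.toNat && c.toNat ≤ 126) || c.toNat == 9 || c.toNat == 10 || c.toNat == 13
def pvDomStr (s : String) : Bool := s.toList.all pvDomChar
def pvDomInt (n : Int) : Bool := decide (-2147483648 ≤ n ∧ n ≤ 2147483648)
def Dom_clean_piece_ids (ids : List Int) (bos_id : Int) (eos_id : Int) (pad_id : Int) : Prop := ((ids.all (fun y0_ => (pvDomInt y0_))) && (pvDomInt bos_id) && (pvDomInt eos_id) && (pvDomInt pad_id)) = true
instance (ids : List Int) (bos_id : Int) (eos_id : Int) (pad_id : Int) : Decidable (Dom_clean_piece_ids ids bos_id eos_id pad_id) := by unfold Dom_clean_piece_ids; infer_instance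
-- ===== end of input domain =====

-- B splits A's fused loop into truncate-at-EOS (pad takes priority) then filter PAD/BOS; alternative decomposition, same cost.
-- ===== PORT A =====
def clean_piece_ids (ids : List Int) (bos_id : Int) (eos_id : Int) (pad_id : Int) : List Int :=
  match ids with
  | [] => []
  | x :: rest =>
    if x = pad_id then clean_piece_ids rest bos_id eos_id pad_id
    else if x = eos_id then []
    else if x = bos_id then clean_piece_ids rest bos_id eos_id pad_id
    else x :: clean_piece_ids rest bos_id eos_id pad_id

-- ===== PORT B =====
def clean_piece_ids_alt (ids : List Int) (bos_id : Int) (eos_id : Int) (pad_id : Int) : List Int :=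
  (ids.takeWhile (fun x => x == pad_id || x != eos_id)).filter (fun x => x != pad_id && x != bos_id)

-- ===== PRECONDITION & SPEC =====
def Spec_clean_piece_ids (ids : List Int) (bos_id : Int) (eos_id : Int) (pad_id : Int) (out : List Int) : Prop := out = clean_piece_ids_alt ids bos_id eos_id pad_id
instance (ids : List Int) (bos_id : Int) (eos_id : Int) (pad_id : Int) (out : List Int) : Decidable (Spec_clean_piece_ids ids bos_id eos_id pad_id out) := by unfold Spec_clean_piece_ids; infer_instance

-- ===== CLAIM =====
def Claim_equal_clean_piece_ids : Prop := ∀ (ids : List Int) (bos_id : Int) (eos_id : Int) (pad_id : Int), Dom_clean_piece_ids ids bos_id eos_id pad_id → Spec_clean_piece_ids ids bos_id eos_id pad_id (clean_piece_ids ids bos_id eos_id pad_id)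

-- ===== LEMMAS AND PROOFS =====
theorem clean_eq (ids : List Int) (bos_id eos_id pad_id : Int) :
    clean_piece_ids ids bos_id eos_id pad_id = clean_piece_ids_alt ids bos_id eos_id pad_id := by
  induction ids with
  | nil => rfl
  | cons x rest ih =>
    simp only [clean_piece_ids, clean_piece_ids_alt, List.takeWhile_cons] at *
    by_cases hp : x = pad_id <;> by_cases he : x = eos_id <;> by_cases hb : x = bos_id <;>
      simp [hp, he, hb] <;> simp_all

-- ===== VERDICT =====
theorem clean_piece_ids_spec : Claim_equal_clean_piece_ids := by
  intro ids bos eos pad _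
  unfold Spec_clean_piece_ids
  exact clean_eq ids bos eos pad
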